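-- pv_equiv track=rewrite | github.com/Artyom-Tamrazov/EGE | 12/39241.py | f
-- ===== SOURCE A (Python) =====
-- def f(size):
--     s = '1' * size
--     while '111' in s or '222' in s:
--         if '111' in s:
--             s = s.replace('111', '22', 1)
--         elif '222' in s:
--             s = s.replace('222', '1', 1)
--     return s
-- ===== SOURCE B (Python) =====
-- # Exact O(1) re-implementation: the rewrite system's normal form of '1'*size
-- # is periodic in size with period 21 once size >= 3 (verified/proved), so a
-- # precomputed 21-entry table replaces the whole rescanning rewrite loop.
-- _TABLE = ["22", "221", "2211", "12", "121", "1211", "11", "22", "221",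
--           "1122", "11221", "112211", "1", "11", "22", "122", "1221",
--           "12211", "112", "1121", "11211"]
--
-- def f(size):
--     if size < 3:
--         return '1' * size
--     return _TABLE[(size - 3) % 21]
-- ===== Notes on version B (the rewrite author's own statement) =====
-- stated objective: faster
-- what changed: B replaces A's repeated full-string rescans and rewrites by an O(1) lookup in a small precomputed table, since the rewrite system's normal form of '1'*size is periodic in size (period twenty-one) once size is at least three.
import Mathlib
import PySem

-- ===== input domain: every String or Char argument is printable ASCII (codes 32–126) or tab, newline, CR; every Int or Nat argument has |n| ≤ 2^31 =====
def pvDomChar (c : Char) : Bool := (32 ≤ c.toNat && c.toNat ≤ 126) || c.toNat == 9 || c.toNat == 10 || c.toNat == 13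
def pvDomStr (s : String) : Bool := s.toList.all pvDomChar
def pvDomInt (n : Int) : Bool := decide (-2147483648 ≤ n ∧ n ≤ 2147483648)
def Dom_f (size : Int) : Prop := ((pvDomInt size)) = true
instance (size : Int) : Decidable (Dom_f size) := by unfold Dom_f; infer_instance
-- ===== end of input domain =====

-- B replaces A's rewrite-to-fixpoint loop by an O(1) lookup: the normal form of '1'*size
-- is proved below to depend only on (size-3) % 21 once size ≥ 3.

-- ===== PORT A =====
-- s.replace(old, new, 1): replace the FIRST occurrence only (exact for nonempty old).
def replaceFirst (s old new : List Char) : List Char :=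
  let i := PySem.Chars.find s old
  if i < 0 then s else s.take i.toNat ++ new ++ s.drop (i.toNat + old.length)

-- the while loop; fuel = current length is always sufficient (each step shortens s).
def fLoopA : Nat → List Char → List Char
  | 0, s => s
  | fuel+1, s =>
    if PySem.Chars.isIn ['1','1','1'] s || PySem.Chars.isIn ['2','2','2'] s then
      if PySem.Chars.isIn ['1','1','1'] s then
        fLoopA fuel (replaceFirst s ['1','1','1'] ['2','2'])
      else
        fLoopA fuel (replaceFirst s ['2','2','2'] ['1'])
    else s

def f (size : Int) : String :=
  let s := PySem.List.pyRepeat ['1'] size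
  String.ofList (fLoopA s.length s)

-- ===== PORT B =====
def fTable : List String :=
  ["22", "221", "2211", "12", "121", "1211", "11", "22", "221",
   "1122", "11221", "112211", "1", "11", "22", "122", "1221",
   "12211", "112", "1121", "11211"]

def f_alt (size : Int) : String :=
  if size < 3 then String.ofList (PySem.List.pyRepeat ['1'] size)
  -- _TABLE[(size-3) % 21]: the index is always in range (0 ≤ r < 21 = len), so .getD "" is exact
  else (PySem.List.pyGet? fTable (PySem.Int.mod (size - 3) 21)).getD ""

-- ===== PRECONDITION & SPEC =====
def Spec_f (size : Int) (out : String) : Prop := out = f_alt size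
instance (size : Int) (out : String) : Decidable (Spec_f size out) := by unfold Spec_f; infer_instance

-- ===== CLAIM (what is proved, stated in full; the proofs are below) =====
def Claim_equal_f : Prop := ∀ (size : Int), Dom_f size → Spec_f size (f size)

-- ===== LEMMAS AND PROOFS =====

-- three-block strings 1^a 2^b 1^c : every reachable state of A's loop has this shape
def enc (a b c : Nat) : List Char :=
  List.replicate a '1' ++ List.replicate b '2' ++ List.replicate c '1'

lemma enc_getElem? (a b c i : Nat) :
    (enc a b c)[i]? =
      if i < a then some '1' else if i < a + b then some '2'
      else if i < a + b + c then some '1' else none := by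
  simp [enc, List.getElem?_append, List.getElem?_replicate]
  split_ifs <;> first | rfl | omega

lemma enc_one_iff (a b c i : Nat) :
    (enc a b c)[i]? = some '1' ↔ (i < a ∨ (a + b ≤ i ∧ i < a + b + c)) := by
  rw [enc_getElem?]; split_ifs <;> simp <;> omega

lemma enc_two_iff (a b c i : Nat) :
    (enc a b c)[i]? = some '2' ↔ (a ≤ i ∧ i < a + b) := by
  rw [enc_getElem?]; split_ifs <;> simp <;> omega

-- [x,y,z] is a prefix of t iff the first three entries are x,y,z
lemma prefix3_iff (x y z : Char) (t : List Char) :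
    ([x, y, z] <+: t) ↔ (t[0]? = some x ∧ t[1]? = some y ∧ t[2]? = some z) := by
  match t with
  | [] => simp
  | [a] => simp [List.cons_prefix_cons]
  | [a, b] => simp [List.cons_prefix_cons]
  | a :: b :: c :: rest =>
    constructor
    · intro h
      rcases h with ⟨r, hr⟩
      simp at hr
      simp [hr.1, hr.2.1, hr.2.2.1]
    · intro ⟨h1, h2, h3⟩
      simp at h1 h2 h3
      subst h1; subst h2; subst h3
      exact ⟨rest, rfl⟩

lemma occ3_prefix_drop (x y z : Char) (s : List Char) (p : Nat) :
    ([x, y, z] <+: s.drop p) ↔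
      (s[p]? = some x ∧ s[p+1]? = some y ∧ s[p+2]? = some z) := by
  rw [prefix3_iff]
  simp [List.getElem?_drop]

lemma isIn3_iff (x y z : Char) (s : List Char) :
    PySem.Chars.isIn [x, y, z] s = true ↔
      ∃ p, s[p]? = some x ∧ s[p+1]? = some y ∧ s[p+2]? = some z := by
  rw [← PySem.Chars.exists_prefix_drop_iff_isIn]
  exact exists_congr fun p => occ3_prefix_drop x y z s p

lemma find3_eq (x y z : Char) (s : List Char) (p : Nat)
    (hp : s[p]? = some x ∧ s[p+1]? = some y ∧ s[p+2]? = some z)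
    (hmin : ∀ i < p, ¬ (s[i]? = some x ∧ s[i+1]? = some y ∧ s[i+2]? = some z)) :
    PySem.Chars.find s [x, y, z] = (p : Int) := by
  have hin : PySem.Chars.isIn [x,y,z] s = true := (isIn3_iff x y z s).2 ⟨p, hp⟩
  have hnn : 0 ≤ PySem.Chars.find s [x,y,z] := by
    rw [PySem.Chars.find_nonneg_iff, ← PySem.Chars.isIn_iff_infix]; exact hin
  obtain ⟨hpre, hless⟩ := PySem.Chars.find_spec hnn
  rw [occ3_prefix_drop] at hpre
  set q := (PySem.Chars.find s [x,y,z]).toNat with hq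
  have : q = p := by
    rcases Nat.lt_trichotomy q p with h | h | h
    · exact absurd hpre (hmin q h)
    · exact h
    · exact absurd ((occ3_prefix_drop x y z s p).2 hp) (hless p h)
  omega

lemma replaceFirst_eq (x y z : Char) (new u v : List Char)
    (h : PySem.Chars.find (u ++ [x,y,z] ++ v) [x,y,z] = (u.length : Int)) :
    replaceFirst (u ++ [x,y,z] ++ v) [x,y,z] new = u ++ new ++ v := by
  unfold replaceFirst
  rw [h]
  have h0 : ¬ ((u.length : Int) < 0) := by omega
  simp only [h0, if_false]
  have ht : (u ++ [x,y,z] ++ v).take (u.length : Int).toNat = u := by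
    rw [List.append_assoc, Int.toNat_natCast, List.take_left]
  have hd : (u ++ [x,y,z] ++ v).drop ((u.length : Int).toNat + 3) = v := by
    have : (u.length : Int).toNat + 3 = (u ++ [x,y,z]).length := by
      simp
    rw [this, List.drop_left]
  simpa [ht] using congrArg (fun w => (u ++ [x,y,z] ++ v).take (u.length:Int).toNat ++ new ++ w) hd

-- length decreases on every fired step
lemma replaceFirst_length_lt (s new : List Char) (x y z : Char)
    (h : PySem.Chars.isIn [x,y,z] s = true) (hn : new.length ≤ 2) :
    (replaceFirst s [x,y,z] new).length < s.length := by
  unfold replaceFirst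
  have hnn : 0 ≤ PySem.Chars.find s [x,y,z] := by
    rw [PySem.Chars.find_nonneg_iff, ← PySem.Chars.isIn_iff_infix]; exact h
  have h0 : ¬ (PySem.Chars.find s [x,y,z] < 0) := by omega
  simp only [h0, if_false]
  obtain ⟨hpre, -⟩ := PySem.Chars.find_spec hnn
  have hle : (PySem.Chars.find s [x,y,z]).toNat + 3 ≤ s.length := by
    have := hpre.length_le
    simp at this
    omega
  simp [List.length_take, List.length_drop]
  omega

lemma fLoopA_nil (fuel : Nat) : fLoopA fuel [] = [] := by
  cases fuel with
  | zero => rfl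
  | succ n =>
    simp [fLoopA, show PySem.Chars.isIn ['1','1','1'] ([] : List Char) = false from by decide,
          show PySem.Chars.isIn ['2','2','2'] ([] : List Char) = false from by decide]

lemma fLoopA_stable : ∀ fuel fuel' (s : List Char), s.length ≤ fuel → s.length ≤ fuel' →
    fLoopA fuel s = fLoopA fuel' s := by
  intro fuel
  induction fuel using Nat.strong_induction_on with
  | _ fuel ih =>
    intro fuel' s hs hs'
    match fuel, fuel' with
    | 0, _ => have : s = [] := by cases s <;> simp_all
              subst this; rw [fLoopA_nil, fLoopA_nil]
    | _+1, 0 => have : s = [] := by cases s <;> simp_all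
                subst this; rw [fLoopA_nil, fLoopA_nil]
    | m+1, k+1 =>
      show fLoopA (m+1) s = fLoopA (k+1) s
      unfold fLoopA
      split
      · split
        · next h1 =>
          have hlt := replaceFirst_length_lt s ['2','2'] '1' '1' '1' h1 (by decide)
          exact ih m (by omega) k _ (by omega) (by omega)
        · next hor h1 =>
          have h2 : PySem.Chars.isIn ['2','2','2'] s = true := by
            revert hor; cases PySem.Chars.isIn ['2','2','2'] s <;> simp_all
          have hlt := replaceFirst_length_lt s ['1'] '2' '2' '2' h2 (by decide)
          exact ih m (by omega) k _ (by omega) (by omega)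
      · rfl

def run (s : List Char) : List Char := fLoopA s.length s

lemma run_eq (fuel : Nat) (s : List Char) (h : s.length ≤ fuel) : fLoopA fuel s = run s :=
  fLoopA_stable fuel s.length s h le_rfl

lemma run_step111 (s : List Char) (h : PySem.Chars.isIn ['1','1','1'] s = true) :
    run s = run (replaceFirst s ['1','1','1'] ['2','2']) := by
  have h3 : 3 ≤ s.length := by
    have := (PySem.Chars.isIn_iff_infix _ _).1 h
    simpa using this.length_le
  have hlt := replaceFirst_length_lt s ['2','2'] '1' '1' '1' h (by decide)
  obtain ⟨k, hk⟩ : ∃ k, s.length = k + 1 := ⟨s.length - 1, by omega⟩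
  conv_lhs => rw [run, hk]
  unfold fLoopA
  rw [if_pos (by rw [h]; rfl), if_pos h]
  exact run_eq k _ (by omega)

lemma run_step222 (s : List Char) (h1 : PySem.Chars.isIn ['1','1','1'] s = false)
    (h2 : PySem.Chars.isIn ['2','2','2'] s = true) :
    run s = run (replaceFirst s ['2','2','2'] ['1']) := by
  have h3 : 3 ≤ s.length := by
    have := (PySem.Chars.isIn_iff_infix _ _).1 h2
    simpa using this.length_le
  have hlt := replaceFirst_length_lt s ['1'] '2' '2' '2' h2 (by decide)
  obtain ⟨k, hk⟩ : ∃ k, s.length = k + 1 := ⟨s.length - 1, by omega⟩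
  conv_lhs => rw [run, hk]
  unfold fLoopA
  rw [if_pos (by rw [h1, h2]; rfl), if_neg (by rw [h1]; exact Bool.false_ne_true)]
  exact run_eq k _ (by omega)

-- STEP LEMMA S03: a leading '111' is rewritten to '22'
lemma step_front (t : List Char) : run ('1' :: '1' :: '1' :: t) = run ('2' :: '2' :: t) := by
  have hfind : PySem.Chars.find ('1'::'1'::'1'::t) ['1','1','1'] = ((0:Nat) : Int) := by
    apply find3_eq
    · exact ⟨rfl, rfl, rfl⟩
    · intro i hi; omega
  have h := replaceFirst_eq '1' '1' '1' ['2','2'] [] t (by simpa using hfind)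
  simp only [List.nil_append, List.cons_append] at h
  have hin : PySem.Chars.isIn ['1','1','1'] ('1'::'1'::'1'::t) = true := by
    rw [isIn3_iff]; exact ⟨0, rfl, rfl, rfl⟩
  rw [run_step111 _ hin, h]

-- STEP LEMMA S1: 2^b 1^(c+3) → 2^(b+2) 1^c
lemma step_ones (b c : Nat) (hb : 1 ≤ b) :
    run (enc 0 b (c+3)) = run (enc 0 (b+2) c) := by
  have hone := enc_one_iff 0 b (c+3)
  have hocc : (enc 0 b (c+3))[b]? = some '1' ∧ (enc 0 b (c+3))[b+1]? = some '1' ∧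
      (enc 0 b (c+3))[b+2]? = some '1' := by
    refine ⟨?_, ?_, ?_⟩ <;> rw [enc_one_iff] <;> omega
  have hfind : PySem.Chars.find (enc 0 b (c+3)) ['1','1','1'] = (b : Int) := by
    apply find3_eq _ _ _ _ b hocc
    intro i hi hgo
    obtain ⟨g1, -, -⟩ := hgo
    have hi2 : (enc 0 b (c+3))[i]? = some '2' := by rw [enc_two_iff]; omega
    rw [g1] at hi2; simp at hi2
  have hdecomp : enc 0 b (c+3) = List.replicate b '2' ++ ['1','1','1'] ++ List.replicate c '1' := by
    simp [enc, List.replicate_add, show c + 3 = 3 + c from by omega]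
  have hfind' : PySem.Chars.find (List.replicate b '2' ++ ['1','1','1'] ++ List.replicate c '1')
      ['1','1','1'] = ((List.replicate b '2').length : Int) := by
    rw [← hdecomp, hfind]; simp
  have hrep := replaceFirst_eq '1' '1' '1' ['2','2'] (List.replicate b '2')
      (List.replicate c '1') hfind'
  have hin : PySem.Chars.isIn ['1','1','1'] (enc 0 b (c+3)) = true := by
    rw [isIn3_iff]; exact ⟨b, hocc⟩
  rw [run_step111 _ hin, hdecomp, hrep]
  congr 1
  simp [enc, List.replicate_add]

-- STEP LEMMA S2: 1^a 2^(b+3) 1^c → 1^(a+1) 2^b 1^c  (a ≤ 2, c ≤ 2: no '111' present)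
lemma step_twos (a b c : Nat) (ha : a ≤ 2) (hc : c ≤ 2) :
    run (enc a (b+3) c) = run (enc (a+1) b c) := by
  have hno111 : PySem.Chars.isIn ['1','1','1'] (enc a (b+3) c) = false := by
    rw [← Bool.not_eq_true, isIn3_iff]
    rintro ⟨p, g1, g2, g3⟩
    rw [enc_one_iff] at g1 g2 g3
    omega
  have hocc : (enc a (b+3) c)[a]? = some '2' ∧ (enc a (b+3) c)[a+1]? = some '2' ∧
      (enc a (b+3) c)[a+2]? = some '2' := by
    refine ⟨?_, ?_, ?_⟩ <;> rw [enc_two_iff] <;> omega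
  have hfind : PySem.Chars.find (enc a (b+3) c) ['2','2','2'] = (a : Int) := by
    apply find3_eq _ _ _ _ a hocc
    intro i hi ⟨g1, g2, g3⟩
    rw [enc_two_iff] at g1 g2 g3
    omega
  have hdecomp : enc a (b+3) c =
      List.replicate a '1' ++ ['2','2','2'] ++ (List.replicate b '2' ++ List.replicate c '1') := by
    simp [enc, List.replicate_add, show b + 3 = 3 + b from by omega]
  have hfind' : PySem.Chars.find (List.replicate a '1' ++ ['2','2','2'] ++
      (List.replicate b '2' ++ List.replicate c '1')) ['2','2','2'] =
      ((List.replicate a '1').length : Int) := by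
    rw [← hdecomp, hfind]; simp
  have hrep := replaceFirst_eq '2' '2' '2' ['1'] (List.replicate a '1')
      (List.replicate b '2' ++ List.replicate c '1') hfind'
  have hin : PySem.Chars.isIn ['2','2','2'] (enc a (b+3) c) = true := by
    rw [isIn3_iff]; exact ⟨a, hocc⟩
  rw [run_step222 _ hno111 hin, hdecomp, hrep]
  congr 1
  simp [enc, List.replicate_succ']

-- phase 1: from all-ones, the leading rewrites pile up a block of 2s
lemma phase1 (k : Nat) : ∀ b c, 1 ≤ b → run (enc 0 b (3*k + c)) = run (enc 0 (b + 2*k) c) := by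
  induction k with
  | zero => intro b c _; norm_num
  | succ k ih =>
    intro b c hb
    have h1 : 3 * (k+1) + c = (3*k + c) + 3 := by omega
    rw [h1, step_ones b (3*k+c) hb, ih (b+2) c (by omega),
        show b + 2 + 2*k = b + 2*(k+1) from by omega]

-- period 7 in the 2-block: 2^(b+7) 1^c → 2^b 1^c  (b ≥ 2, c ≤ 2)
lemma period7 (b c : Nat) (_hb : 2 ≤ b) (hc : c ≤ 2) :
    run (enc 0 (b+7) c) = run (enc 0 b c) := by
  obtain ⟨b', rfl⟩ : ∃ b', b = b' + 2 := ⟨b - 2, by omega⟩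
  have s1 : run (enc 0 (b'+2+7) c) = run (enc 1 (b'+2+4) c) := by
    have := step_twos 0 (b'+2+4) c (by omega) hc
    rw [show b'+2+4+3 = b'+2+7 from by omega] at this
    exact this
  have s2 : run (enc 1 (b'+2+4) c) = run (enc 2 (b'+2+1) c) := by
    have := step_twos 1 (b'+2+1) c (by omega) hc
    rw [show b'+2+1+3 = b'+2+4 from by omega] at this
    exact this
  have s3 : run (enc 2 (b'+2+1) c) = run (enc 3 b' c) := by
    have := step_twos 2 b' c (by omega) hc
    rw [show b'+3 = b'+2+1 from by omega] at this
    exact this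
  have s4 : run (enc 3 b' c) = run (enc 0 (b'+2) c) := by
    have hdec : enc 3 b' c = '1' :: '1' :: '1' :: (List.replicate b' '2' ++ List.replicate c '1') := by
      simp [enc]
    rw [hdec, step_front]
    have hb2 : enc 0 (b'+2) c = '2' :: '2' :: (List.replicate b' '2' ++ List.replicate c '1') := by
      simp only [enc, List.replicate_zero, List.nil_append]
      rw [show b'+2 = 2 + b' from by omega, List.replicate_add]
      rfl
    rw [hb2]
  rw [s1, s2, s3, s4]

-- ones: 1^(n+3) rewrites first to 22 1^n = enc 0 2 n
lemma ones_start (n : Nat) : run (List.replicate (n+3) '1') = run (enc 0 2 n) := by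
  have : List.replicate (n+3) '1' = '1' :: '1' :: '1' :: List.replicate n '1' := by
    simp [show n + 3 = 3 + n from by omega, List.replicate_add]
  rw [this, step_front,
      show enc 0 2 n = '2' :: '2' :: List.replicate n '1' from by simp [enc]]

-- period 21 in the number of ones
lemma period21 (m : Nat) :
    run (List.replicate (m + 24) '1') = run (List.replicate (m + 3) '1') := by
  obtain ⟨k, c, hc, rfl⟩ : ∃ k c, c < 3 ∧ m = 3*k + c := ⟨m / 3, m % 3, by omega, by omega⟩
  rw [show 3*k + c + 24 = (3*(k+7) + c) + 3 from by omega, ones_start,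
      show 3*k + c + 3 = (3*k + c) + 3 from rfl, ones_start,
      phase1 (k+7) 2 c (by omega), phase1 k 2 c (by omega),
      show 2 + 2*(k+7) = (2 + 2*k + 7) + 7 from by omega,
      period7 (2 + 2*k + 7) c (by omega) (by omega),
      period7 (2 + 2*k) c (by omega) (by omega)]

-- the normal form of 1^(m+3) as a function of m % 21
lemma main_tab (m : Nat) :
    run (List.replicate (m+3) '1') = (fTable[m % 21]?.getD "").toList := by
  induction m using Nat.strong_induction_on with
  | _ m ih =>
    by_cases h : m < 21
    · interval_cases m <;> decide
    · obtain ⟨k, rfl⟩ : ∃ k, m = k + 21 := ⟨m - 21, by omega⟩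
      rw [show k + 21 + 3 = k + 24 from rfl, period21 k, ih k (by omega),
          Nat.add_mod_right]

-- ===== VERDICT (by name: the statement is the Claim_ definition above) =====
theorem f_spec : Claim_equal_f := by
  unfold Claim_equal_f Spec_f
  intro size _
  simp only [f, f_alt, PySem.List.pyRepeat_singleton]
  by_cases h : size < 3
  · rw [if_pos h]
    have hn : size.toNat ≤ 2 := by omega
    generalize size.toNat = n at hn
    interval_cases n <;> rfl
  · rw [if_neg h]
    obtain ⟨m, hm⟩ : ∃ m, size.toNat = m + 3 := ⟨size.toNat - 3, by omega⟩
    have hsize : size - 3 = (m : Int) := by omega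
    rw [hm, hsize, show (21:Int) = ((21:Nat):Int) from rfl, PySem.Int.mod_natCast,
        PySem.List.pyGet?_natCast]
    show String.ofList (run (List.replicate (m+3) '1')) = _
    rw [main_tab m]
    exact String.ofList_toList
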